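-- pv_equiv track=rewrite | github.com/AleksandrShkraba/hometask | all_tasks/!!!TASK/python!/python/day2var1/task5.py | is_circular
-- ===== SOURCE A (Python) =====
-- def is_circular(path):
--     x = 0
--     y = 0
--     for i in range(len(path)):
--         move = path[i]
--         if move == 'R':
--             x += 1
--         elif move == 'L':
--             x -= 1
--         elif move == 'U':
--             y += 1
--         elif move == 'D':
--             y -= 1
--     return x, y
-- ===== SOURCE B (Python) =====
-- def is_circular(path):
--     # Divide and conquer: displacement of a path is the sum of the
--     # displacements of its halves; single moves come from a lookup table.
--     if not path:
--         return (0, 0)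
--     if len(path) == 1:
--         return {'R': (1, 0), 'L': (-1, 0), 'U': (0, 1), 'D': (0, -1)}.get(path, (0, 0))
--     mid = len(path) // 2
--     x1, y1 = is_circular(path[:mid])
--     x2, y2 = is_circular(path[mid:])
--     return (x1 + x2, y1 + y2)
-- ===== Notes on version B (the rewrite author's own statement) =====
-- stated objective: alternative
-- what changed: Replaces A's iterative per-character branch loop with a recursive divide-and-conquer: split the path at the midpoint, recursively compute each half's displacement, and add the two vectors; single moves come from a lookup table, exploiting that net displacement is additive under concatenation.
import Mathlib
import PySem

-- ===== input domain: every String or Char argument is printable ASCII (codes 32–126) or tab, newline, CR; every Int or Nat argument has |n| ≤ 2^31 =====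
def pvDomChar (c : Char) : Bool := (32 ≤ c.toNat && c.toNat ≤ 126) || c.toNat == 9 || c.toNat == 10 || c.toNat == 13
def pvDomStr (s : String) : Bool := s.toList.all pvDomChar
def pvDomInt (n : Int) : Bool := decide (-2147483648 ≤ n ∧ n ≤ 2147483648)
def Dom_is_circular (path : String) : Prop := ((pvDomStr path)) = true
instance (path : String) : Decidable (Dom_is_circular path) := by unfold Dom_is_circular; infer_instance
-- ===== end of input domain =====

-- B replaces A's iterative per-character branch loop by divide-and-conquer
-- recursion (split at the midpoint, add the halves' displacement vectors);
-- alternative decomposition, same results.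

-- ===== PORT A =====
def is_circular (path : String) : Int × Int :=
  (PySem.List.pyRange 0 (PySem.Str.len path) 1).foldl
    (fun (xy : Int × Int) i =>
      let move := PySem.List.pyGetD path.toList i ' '
      if move = 'R' then (xy.1 + 1, xy.2)
      else if move = 'L' then (xy.1 - 1, xy.2)
      else if move = 'U' then (xy.1, xy.2 + 1)
      else if move = 'D' then (xy.1, xy.2 - 1)
      else xy)
    (0, 0)

-- ===== PORT B =====
-- the literal dict {'R': (1,0), …} of Source B; its keys are 1-char strings, here their chars
def pvTable : PySem.Dict Char (Int × Int) :=
  PySem.Dict.ofList [('R', (1, 0)), ('L', (-1, 0)), ('U', (0, 1)), ('D', (0, -1))]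

-- Source B's recursion on the string's characters; path[:mid] / path[mid:] with
-- 0 ≤ mid ≤ len are exactly List.take / List.drop (PySem.List.slice_to_natCast /
-- slice_from_natCast), used directly so termination is by length.
def pvGo : List Char → Int × Int
  | [] => (0, 0)
  | [c] => pvTable.getD c (0, 0)
  | a :: b :: t =>
    let l := a :: b :: t
    let mid := l.length / 2
    let p := pvGo (l.take mid)
    let q := pvGo (l.drop mid)
    (p.1 + q.1, p.2 + q.2)
termination_by l => l.length
decreasing_by
  · simp only [List.length_take, List.length_cons]; omega
  · simp only [List.length_drop, List.length_cons]; omega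

def is_circular_alt (path : String) : Int × Int := pvGo path.toList

-- ===== PRECONDITION & SPEC =====
def Spec_is_circular (path : String) (out : Int × Int) : Prop := out = is_circular_alt path
instance (path : String) (out : Int × Int) : Decidable (Spec_is_circular path out) := by unfold Spec_is_circular; infer_instance

-- ===== CLAIM (what is proved, stated in full; the proofs are below) =====
def Claim_equal_is_circular : Prop := ∀ (path : String), Dom_is_circular path → Spec_is_circular path (is_circular path)

-- ===== LEMMAS AND PROOFS =====

def pvStep (xy : Int × Int) (move : Char) : Int × Int :=
  if move = 'R' then (xy.1 + 1, xy.2)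
  else if move = 'L' then (xy.1 - 1, xy.2)
  else if move = 'U' then (xy.1, xy.2 + 1)
  else if move = 'D' then (xy.1, xy.2 - 1)
  else xy

-- closed form of A's fold
theorem foldl_pvStep_counts (l : List Char) (x y : Int) :
    l.foldl pvStep (x, y)
    = (x + l.count 'R' - l.count 'L', y + l.count 'U' - l.count 'D') := by
  induction l generalizing x y with
  | nil => simp
  | cons c t ih =>
    simp only [List.foldl_cons, List.count_cons, pvStep]
    split_ifs with h1 h2 h3 h4 <;> simp_all <;> ring

-- closed form of B's divide-and-conquer
theorem pvGo_counts (l : List Char) :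
    pvGo l
    = ((l.count 'R' : Int) - l.count 'L', (l.count 'U' : Int) - l.count 'D') := by
  induction l using pvGo.induct with
  | case1 => simp [pvGo]
  | case2 c =>
    simp only [pvGo, List.count_cons, List.count_nil]
    by_cases h1 : c = 'R' <;> by_cases h2 : c = 'L' <;>
      by_cases h3 : c = 'U' <;> by_cases h4 : c = 'D' <;>
      simp_all [show pvTable = PySem.Dict.mk
          [('R', ((1 : Int), (0 : Int))), ('L', (-1, 0)), ('U', (0, 1)), ('D', (0, -1))] from rfl,
        PySem.Dict.getD, PySem.Dict.get?_mk_cons]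
    simp [PySem.Dict.get?, Ne.symm h1, Ne.symm h2, Ne.symm h3, Ne.symm h4]
  | case3 a b t lv midv ih1 =>
    rename_i ih2
    simp only [show lv = a :: b :: t from rfl,
      show midv = (a :: b :: t).length / 2 from rfl] at ih1 ih2
    simp only [pvGo]
    rw [ih1, ih2]
    have hc : ∀ ch : Char,
        ((a :: b :: t).take ((a :: b :: t).length / 2)).count ch
          + ((a :: b :: t).drop ((a :: b :: t).length / 2)).count ch
        = (a :: b :: t).count ch := by
      intro ch
      rw [← List.count_append, List.take_append_drop]
    have hR := hc 'R'; have hL := hc 'L'; have hU := hc 'U'; have hD := hc 'D'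
    simp only [Prod.mk.injEq]
    constructor <;> push_cast <;> omega

-- ===== VERDICT (by name: the statement is the Claim_ definition above) =====
theorem is_circular_spec : Claim_equal_is_circular := by
  intro path _
  unfold Spec_is_circular is_circular is_circular_alt
  rw [show PySem.Str.len path = PySem.List.len path.toList from by
        simp [PySem.Str.len_eq, PySem.List.len]]
  rw [show (fun (xy : Int × Int) (i : Int) =>
        let move := PySem.List.pyGetD path.toList i ' '
        if move = 'R' then (xy.1 + 1, xy.2)
        else if move = 'L' then (xy.1 - 1, xy.2)
        else if move = 'U' then (xy.1, xy.2 + 1)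
        else if move = 'D' then (xy.1, xy.2 - 1)
        else xy)
      = (fun xy i => pvStep xy (PySem.List.pyGetD path.toList i ' ')) from rfl]
  rw [PySem.List.foldl_pyRange_zero_pyGetD]
  rw [foldl_pvStep_counts, pvGo_counts]
  simp
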